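/- GENERATED by tools/from_farm_form.py from prooffarm-gif/accepted/DGifDecompressInput.3/Proof.lean (a worked proof of the farm's unit `DGifDecompressInput.3`,
   accepted by the verdict) — do not edit. -/
import Gif.Spec.Units.DGifDecompressInput_3
import Gif.Spec.AllSegs
import Gif.Spec.Proved.DGifDecompressInput_3_Lemmas

open X86 X86.User Asan ProgX.Base ProgX.Base.Spec Gif.Spec

/-!
  `DGifDecompressInput.3` (0x10688e … 0x10693d, 45 instructions; dgif_lib.c:1093-1109): the tail of `DGifDecompressInput` behind the
  fill loop. The segment is walked in TWO STEPS that meet at 0x1068e2 (`ret11`, the return of the check of l.1103), with the private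
  assertion `di3_Mid` there (Lemmas.lean):

      di3_seg_head     0x10688e … 0x1068e2: `*Code = CrntShiftDWord & CodeMasks[RunningBits]`, `CrntShiftDWord >>= RunningBits`,
                       `CrntShiftState -= RunningBits`                                               `Tail` → `di3_Mid`
      di3_seg_tail     0x1068e2 … 0x106874: `RunningCode`, `MaxCode1`, `RunningBits` advance; `eax = 1`  `di3_Mid` → `Done`
-/

/-- Segment 3 of `DGifDecompressInput` takes `Tail` at 0x10688e to `Done` at 0x106874. -/
theorem Gif.Spec.Proved.DGifDecompressInput_3_ok : Gif.Spec.DGifDecompressInput_3.Statement := by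
  intro Lay hLay μ hμ u₀ hcode h_load8 h_load2 h_store4 h_load4 H rest frames F R e ret v hat
  -- 0x10688e … 0x1068e2 (ret11): l.1093-1096
  refine (Gif.Spec.DGifDecompressInput_3.di3_seg_head Lay hLay μ hμ u₀ hcode h_load8 h_load2 h_store4 h_load4
    H rest frames F R e ret v hat).trans ?_
  -- 0x1068e2 … 0x106874: l.1103-1109
  intro v1 hv1
  exact Gif.Spec.DGifDecompressInput_3.di3_seg_tail Lay hLay μ hμ u₀ hcode h_load4 H rest frames F R e ret v1 hv1
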